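-- pv_equiv track=rewrite | github.com/tzislam/Dashing | util/h5_utils.py | validate_region_events
-- ===== SOURCE A (Python) =====
-- def validate_region_events(h5_dict):
--     event_set = set()
--
--     # Iterate over each region and add their events to a set
--     for reg in h5_dict:
--         for ev in h5_dict[reg]:
--             event_set.add(ev)
--
--     # Assert that each region has all the same counters
--     for reg in h5_dict:
--         assert set(h5_dict[reg].keys()) == event_set
--
--     return event_set
-- ===== SOURCE B (Python) =====
-- def validate_region_events(h5_dict):
--     it = iter(h5_dict)
--     first = next(it, None)
--     if first is None:
--         return set()
--     ref = set(h5_dict[first].keys())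
--     for reg in it:
--         assert set(h5_dict[reg].keys()) == ref
--     return ref
-- ===== Notes on version B (the rewrite author's own statement) =====
-- stated objective: simpler
-- what changed: Instead of building the union of all regions' event keys and then re-scanning every region against that union, B takes the first region's key set as the fixed reference, compares each remaining region to it in a single pass, and returns the reference (empty set for empty input).
import Mathlib
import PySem

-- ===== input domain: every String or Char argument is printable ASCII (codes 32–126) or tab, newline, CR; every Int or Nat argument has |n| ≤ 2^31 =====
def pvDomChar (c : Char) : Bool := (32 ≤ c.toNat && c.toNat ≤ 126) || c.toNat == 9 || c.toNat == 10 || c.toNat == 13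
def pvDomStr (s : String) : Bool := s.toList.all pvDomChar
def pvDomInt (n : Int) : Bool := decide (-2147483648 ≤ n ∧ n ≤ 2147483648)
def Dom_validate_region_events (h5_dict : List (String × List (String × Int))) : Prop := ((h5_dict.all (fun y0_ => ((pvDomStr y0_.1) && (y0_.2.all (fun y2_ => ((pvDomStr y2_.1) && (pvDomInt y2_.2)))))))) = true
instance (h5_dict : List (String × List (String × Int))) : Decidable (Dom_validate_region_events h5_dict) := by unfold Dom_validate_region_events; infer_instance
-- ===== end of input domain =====

-- B replaces A's "build the union of all regions' keys, then verify each region against the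
-- union" with a single pass that fixes the FIRST region's key set as the reference and
-- compares every other region to it (objective: simpler).

-- ===== PORT A =====
-- the keys of an inner dict (Python's `for ev in h5_dict[reg]` / `h5_dict[reg].keys()`)
def innerKeys (evs : List (String × Int)) : List String :=
  (PySem.Dict.ofList evs).keys

def validate_region_events (h5_dict : List (String × List (String × Int))) : List String :=
  let d := PySem.Dict.ofList h5_dict
  -- event_set = set(); for reg in h5_dict: for ev in h5_dict[reg]: event_set.add(ev)
  let event_set : PySem.Set String :=
    d.items.foldl (fun s p => (innerKeys p.2).foldl (fun s' e => PySem.Set.add s' e) s)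
      PySem.Set.empty
  -- for reg in h5_dict: assert set(h5_dict[reg].keys()) == event_set
  -- (on a failing assert Python raises AssertionError; those inputs are outside Pre_)
  if d.items.all (fun p => PySem.Set.equal (PySem.Set.ofList (innerKeys p.2)) event_set) then
    event_set
  else []

-- ===== PORT B =====
def validate_region_events_alt (h5_dict : List (String × List (String × Int))) : List String :=
  match (PySem.Dict.ofList h5_dict).items with
  | [] => []   -- next(it, None) is None: return set()
  | (_, evs0) :: rest =>
    let ref : PySem.Set String := PySem.Set.ofList (innerKeys evs0)
    -- for reg in it: assert set(h5_dict[reg].keys()) == ref   (AssertionError outside Pre_)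
    if rest.all (fun p => PySem.Set.equal (PySem.Set.ofList (innerKeys p.2)) ref) then ref
    else []

-- ===== PRECONDITION & SPEC =====
-- Pre_ excludes exactly the inputs on which A's assertion fails (AssertionError): every two
-- effective regions of the dict must carry the same set of event keys.
def Pre_validate_region_events (h5_dict : List (String × List (String × Int))) : Prop :=
  ∀ p ∈ (PySem.Dict.ofList h5_dict).items, ∀ q ∈ (PySem.Dict.ofList h5_dict).items,
    innerKeys p.2 ⊆ innerKeys q.2
instance (h5_dict : List (String × List (String × Int))) : Decidable (Pre_validate_region_events h5_dict) := by unfold Pre_validate_region_events; infer_instance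

def pvWitness_validate_region_events : (List (String × List (String × Int))) :=
  [("a", [("x", 1), ("y", 2)]), ("b", [("y", 3), ("x", 4)])]

def Spec_validate_region_events (h5_dict : List (String × List (String × Int))) (out : List String) : Prop := out = validate_region_events_alt h5_dict
instance (h5_dict : List (String × List (String × Int))) (out : List String) : Decidable (Spec_validate_region_events h5_dict out) := by unfold Spec_validate_region_events; infer_instance

-- ===== CLAIM (what is proved, stated in full; the proofs are below) =====
def Claim_equal_validate_region_events : Prop := ∀ (h5_dict : List (String × List (String × Int))), Dom_validate_region_events h5_dict → Pre_validate_region_events h5_dict → Spec_validate_region_events h5_dict (validate_region_events h5_dict)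

-- ===== LEMMAS AND PROOFS =====

-- adding elements that are already present leaves a set unchanged
theorem foldl_add_of_subset (s : PySem.Set String) (l : List String) (h : ∀ x ∈ l, x ∈ s) :
    l.foldl (fun s' e => PySem.Set.add s' e) s = s := by
  induction l generalizing s with
  | nil => rfl
  | cons x t ih =>
    simp only [List.foldl_cons]
    rw [PySem.Set.add_of_mem (h x (by simp))]
    exact ih s (fun y hy => h y (by simp [hy]))

-- a fold of key-unions over regions whose keys already lie in s leaves s unchanged
theorem foldl_union_of_subset (s : PySem.Set String) (l : List (String × List (String × Int)))
    (h : ∀ p ∈ l, ∀ x ∈ innerKeys p.2, x ∈ s) :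
    l.foldl (fun s' p => (innerKeys p.2).foldl (fun s'' e => PySem.Set.add s'' e) s') s = s := by
  induction l with
  | nil => rfl
  | cons q t ih =>
    simp only [List.foldl_cons]
    rw [foldl_add_of_subset s _ (h q (by simp))]
    exact ih (fun p hp => h p (by simp [hp]))

-- ===== VERDICT =====
theorem validate_region_events_spec : Claim_equal_validate_region_events := by
  intro h5 _ hpre
  unfold Spec_validate_region_events validate_region_events validate_region_events_alt
  unfold Pre_validate_region_events at hpre
  cases hd : (PySem.Dict.ofList h5).items with
  | nil => simp [hd]
  | cons p0 rest =>
    obtain ⟨r0, evs0⟩ := p0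
    rw [hd] at hpre
    have h0mem : ((r0, evs0) : String × List (String × Int)) ∈ (r0, evs0) :: rest := by simp
    have hkeys_nodup : (innerKeys evs0).Nodup := PySem.Dict.nodup_keys_ofList evs0
    have href : PySem.Set.ofList (innerKeys evs0) = innerKeys evs0 :=
      PySem.Set.ofList_eq_self_of_nodup _ hkeys_nodup
    have hfold0 : (innerKeys evs0).foldl (fun s' e => PySem.Set.add s' e) PySem.Set.empty
        = PySem.Set.ofList (innerKeys evs0) := (PySem.Set.ofList_eq_foldl _).symm
    -- the union fold over the remaining regions leaves the first region's key set unchanged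
    have hunion :
        rest.foldl (fun s p => (innerKeys p.2).foldl (fun s' e => PySem.Set.add s' e) s)
          (PySem.Set.ofList (innerKeys evs0)) = PySem.Set.ofList (innerKeys evs0) := by
      refine foldl_union_of_subset _ _ (fun p hp x hx => ?_)
      rw [href]
      exact hpre p (by simp [hp]) (r0, evs0) h0mem hx
    -- every region's key set equals the first region's (as a Python set)
    have hcheck : ∀ p ∈ (r0, evs0) :: rest,
        PySem.Set.equal (PySem.Set.ofList (innerKeys p.2)) (PySem.Set.ofList (innerKeys evs0)) = true := by
      intro p hp
      rw [PySem.Set.equal_iff]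
      intro x
      simp only [PySem.Set.mem_ofList]
      exact ⟨fun hx => hpre p hp (r0, evs0) h0mem hx,
             fun hx => hpre (r0, evs0) h0mem p hp hx⟩
    have hallA : ((r0, evs0) :: rest).all
        (fun p => PySem.Set.equal (PySem.Set.ofList (innerKeys p.2)) (PySem.Set.ofList (innerKeys evs0))) = true :=
      List.all_eq_true.mpr hcheck
    have hallB : rest.all
        (fun p => PySem.Set.equal (PySem.Set.ofList (innerKeys p.2)) (PySem.Set.ofList (innerKeys evs0))) = true :=
      List.all_eq_true.mpr (fun p hp => hcheck p (by simp [hp]))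
    simp only [hd, List.foldl_cons, hfold0, hunion, hallA, hallB, if_true]
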